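-- pv_equiv track=rewrite | github.com/rajeshrai248/be-invest | tests/enhanced_llm_prompts.py | create_focused_text_for_extraction
-- ===== SOURCE A (Python) =====
-- def create_focused_text_for_extraction(text: str, max_lines: int = 500) -> str:
--     """Create focused text that prioritizes fee-related content."""
--     lines = text.strip().split('\n')
--
--     # Score lines based on fee-related keywords
--     scored_lines = []
--     for i, line in enumerate(lines):
--         score = 0
--         line_lower = line.lower()
--
--         # Primary fee indicators (high score)
--         for keyword in ["tarif", "fee", "commission", "kosten", "charges", "pricing"]:
--             if keyword in line_lower:
--                 score += 10
--
--         # Secondary indicators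
--         for keyword in ["€", "%", "eur", "minimum", "maximum", "handling"]:
--             if keyword in line_lower:
--                 score += 5
--
--         # Market indicators
--         for keyword in ["brussels", "paris", "amsterdam", "euronext"]:
--             if keyword in line_lower:
--                 score += 3
--
--         # Instrument indicators
--         for keyword in ["etf", "equity", "stock", "bond", "aandeel"]:
--             if keyword in line_lower:
--                 score += 2
--
--         scored_lines.append((score, i, line))
--
--     # Sort by score and take top lines
--     scored_lines.sort(key=lambda x: x[0], reverse=True)
--     top_lines = [line for _, _, line in scored_lines[:max_lines]]
--
--     return '\n'.join(top_lines)
-- ===== SOURCE B (Python) =====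
-- _KEYWORD_GROUPS = [
--     (10, ["tarif", "fee", "commission", "kosten", "charges", "pricing"]),
--     (5, ["\u20ac", "%", "eur", "minimum", "maximum", "handling"]),
--     (3, ["brussels", "paris", "amsterdam", "euronext"]),
--     (2, ["etf", "equity", "stock", "bond", "aandeel"]),
-- ]
-- _MAX_SCORE = 112  # 6*10 + 6*5 + 4*3 + 5*2
--
--
-- def create_focused_text_for_extraction(text: str, max_lines: int = 500) -> str:
--     """Bucket (counting) sort over the bounded score range instead of list.sort."""
--     buckets = [[] for _ in range(_MAX_SCORE + 1)]
--     for line in text.strip().split('\n'):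
--         low = line.lower()
--         score = sum(w * sum(k in low for k in kws) for w, kws in _KEYWORD_GROUPS)
--         buckets[score].append(line)
--     ordered = []
--     for bucket in reversed(buckets):
--         ordered.extend(bucket)
--     return '\n'.join(ordered[:max_lines])
-- ===== Notes on version B (the rewrite author's own statement) =====
-- stated objective: alternative
-- what changed: Replaces the comparison sort (list.sort with reverse=True) over scored lines by a bucket/counting sort over the bounded score range 0..112, appending each line to its score bucket and concatenating buckets from highest to lowest score, which preserves the stable tie order.
import Mathlib
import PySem

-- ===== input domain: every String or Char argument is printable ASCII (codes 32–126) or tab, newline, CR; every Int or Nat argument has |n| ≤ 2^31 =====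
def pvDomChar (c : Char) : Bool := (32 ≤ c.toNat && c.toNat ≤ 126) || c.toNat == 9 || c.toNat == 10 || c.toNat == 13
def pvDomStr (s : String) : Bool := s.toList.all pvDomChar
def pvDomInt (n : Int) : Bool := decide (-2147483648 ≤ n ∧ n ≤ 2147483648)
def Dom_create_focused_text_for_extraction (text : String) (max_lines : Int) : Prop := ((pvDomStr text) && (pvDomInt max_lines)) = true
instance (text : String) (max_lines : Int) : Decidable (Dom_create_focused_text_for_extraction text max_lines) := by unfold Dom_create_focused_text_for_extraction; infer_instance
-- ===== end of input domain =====

-- B replaces A's list.sort over scored lines by a bucket (counting) sort over the bounded score range 0..112; return value equivalence proved on the full domain.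


-- ===== PORT A =====
def create_focused_text_for_extraction (text : String) (max_lines : Int) : String :=
  let lines := (PySem.Str.split? (PySem.Str.strip text) "\n").getD []
  let scored_lines := (PySem.List.enumerate lines).foldl
    (fun acc p =>
      let line := p.2
      let line_lower := PySem.Str.lower line
      let score : Int := 0
      let score := ["tarif", "fee", "commission", "kosten", "charges", "pricing"].foldl
        (fun s kw => if PySem.Str.isIn kw line_lower then s + 10 else s) score
      let score := ["€", "%", "eur", "minimum", "maximum", "handling"].foldl
        (fun s kw => if PySem.Str.isIn kw line_lower then s + 5 else s) score
      let score := ["brussels", "paris", "amsterdam", "euronext"].foldl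
        (fun s kw => if PySem.Str.isIn kw line_lower then s + 3 else s) score
      let score := ["etf", "equity", "stock", "bond", "aandeel"].foldl
        (fun s kw => if PySem.Str.isIn kw line_lower then s + 2 else s) score
      acc ++ [(score, p.1, line)])
    ([] : List (Int × Int × String))
  let scored_sorted := PySem.List.sorted scored_lines (fun x => x.1) true
  let top_lines := (PySem.List.slice scored_sorted none (some max_lines)).map (fun x => x.2.2)
  PySem.Str.join "\n" top_lines

-- ===== PORT B =====
def pvGroups : List (Int × List String) :=
  [(10, ["tarif", "fee", "commission", "kosten", "charges", "pricing"]),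
   (5, ["€", "%", "eur", "minimum", "maximum", "handling"]),
   (3, ["brussels", "paris", "amsterdam", "euronext"]),
   (2, ["etf", "equity", "stock", "bond", "aandeel"])]

def pvScore (low : String) : Int :=
  (pvGroups.map (fun g =>
    g.1 * (g.2.map (fun k => if PySem.Str.isIn k low then (1 : Int) else 0)).sum)).sum

def create_focused_text_for_extraction_alt (text : String) (max_lines : Int) : String :=
  let buckets := (PySem.List.pyRange 0 (112 + 1) 1).map (fun _ => ([] : List String))
  let buckets := ((PySem.Str.split? (PySem.Str.strip text) "\n").getD []).foldl
    (fun bs line =>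
      let low := PySem.Str.lower line
      let score := pvScore low
      PySem.List.pySetD bs score (PySem.List.pyGetD bs score [] ++ [line]))
    buckets
  let ordered := buckets.reverse.foldl (fun acc b => acc ++ b) ([] : List String)
  PySem.Str.join "\n" (PySem.List.slice ordered none (some max_lines))

-- ===== PRECONDITION & SPEC =====
def Spec_create_focused_text_for_extraction (text : String) (max_lines : Int) (out : String) : Prop := out = create_focused_text_for_extraction_alt text max_lines
instance (text : String) (max_lines : Int) (out : String) : Decidable (Spec_create_focused_text_for_extraction text max_lines out) := by unfold Spec_create_focused_text_for_extraction; infer_instance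

-- ===== CLAIM (what is proved, stated in full; the proofs are below) =====
def Claim_equal_create_focused_text_for_extraction : Prop := ∀ (text : String) (max_lines : Int), Dom_create_focused_text_for_extraction text max_lines → Spec_create_focused_text_for_extraction text max_lines (create_focused_text_for_extraction text max_lines)

-- ===== LEMMAS AND PROOFS =====

-- descending concatenation of score buckets: bucket n, then n-1, …, then 0
def pvBflat {α : Type} (key : α → Int) (xs : List α) : Nat → List α
  | 0 => xs.filter (fun x => key x = 0)
  | n + 1 => xs.filter (fun x => key x = ((n + 1 : Nat) : Int)) ++ pvBflat key xs n

theorem pv_bflat_nil {α : Type} (key : α → Int) : ∀ n, pvBflat key ([] : List α) n = [] := by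
  intro n; induction n with
  | zero => simp [pvBflat]
  | succ n ih => simp [pvBflat, ih]

theorem pv_mem_bflat_le {α : Type} (key : α → Int) (xs : List α) :
    ∀ n, ∀ y ∈ pvBflat key xs n, 0 ≤ key y ∧ key y ≤ (n : Int) := by
  intro n; induction n with
  | zero => intro y hy; simp [pvBflat] at hy; omega
  | succ n ih =>
      intro y hy
      simp only [pvBflat, List.mem_append, List.mem_filter, decide_eq_true_eq] at hy
      rcases hy with ⟨_, h⟩ | h
      · push_cast at h; omega
      · have := ih y h; push_cast at this ⊢; omega

theorem pv_bflat_append_skip {α : Type} (key : α → Int) (xs : List α) (x : α) :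
    ∀ n, ((n : Nat) : Int) < key x → pvBflat key (xs ++ [x]) n = pvBflat key xs n := by
  intro n; induction n with
  | zero =>
      intro h; simp only [pvBflat, List.filter_append, List.filter_cons, List.filter_nil]
      have : ¬ (key x = 0) := by omega
      simp [this]
  | succ n ih =>
      intro h
      simp only [pvBflat, List.filter_append, List.filter_cons, List.filter_nil]
      have h1 : ¬ (key x = (n : Int) + 1) := by push_cast at h; omega
      have h2 : ((n : Nat) : Int) < key x := by push_cast at h; omega
      simp [h1, ih h2]

theorem pv_insertBy_append_left {α : Type} (before : α → α → Bool) (x : α) :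
    ∀ (L1 L2 : List α), (∀ y ∈ L1, before x y = false) →
      PySem.List.insertBy before x (L1 ++ L2) = L1 ++ PySem.List.insertBy before x L2 := by
  intro L1; induction L1 with
  | nil => intro L2 _; simp
  | cons y L1 ih =>
      intro L2 h
      have hy : before x y = false := h y (by simp)
      simp only [List.cons_append]
      rw [show PySem.List.insertBy before x (y :: (L1 ++ L2))
            = y :: PySem.List.insertBy before x (L1 ++ L2) by
          simp [PySem.List.insertBy, hy],
        ih L2 (fun a ha => h a (by simp [ha]))]

theorem pv_insertBy_all_before {α : Type} (before : α → α → Bool) (x : α) (L : List α)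
    (h : ∀ y ∈ L, before x y = true) : PySem.List.insertBy before x L = x :: L := by
  cases L with
  | nil => simp [PySem.List.insertBy]
  | cons z zs => simp [PySem.List.insertBy, h z (by simp)]

theorem pv_bflat_insert {α : Type} (key : α → Int) (x : α) (hx0 : 0 ≤ key x) :
    ∀ (n : Nat) (xs : List α), key x ≤ (n : Int) →
      PySem.List.insertBy (fun a b => decide (key b < key a)) x (pvBflat key xs n)
        = pvBflat key (xs ++ [x]) n := by
  intro n; induction n with
  | zero =>
      intro xs hn
      have hkx : key x = 0 := by omega
      rw [PySem.List.insertBy_of_forall_not_before]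
      · simp [pvBflat, List.filter_append, hkx]
      · intro y hy
        have := pv_mem_bflat_le key xs 0 y hy
        simp only [decide_eq_false_iff_not, not_lt]; omega
  | succ n ih =>
      intro xs hn
      by_cases hk : key x = (n : Int) + 1
      · -- x belongs to the top bucket: goes after the whole filter, before the rest
        simp only [pvBflat]
        rw [pv_insertBy_append_left]
        · rw [pv_insertBy_all_before]
          · rw [pv_bflat_append_skip key xs x n (by push_cast; omega)]
            simp [List.filter_append, hk]
          · intro y hy
            have := pv_mem_bflat_le key xs n y hy
            simp only [decide_eq_true_eq]; omega
        · intro y hy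
          simp only [List.mem_filter, decide_eq_true_eq] at hy
          simp only [decide_eq_false_iff_not, not_lt]; omega
      · have hle : key x ≤ (n : Int) := by push_cast at hn ⊢; omega
        simp only [pvBflat]
        rw [pv_insertBy_append_left]
        · rw [ih xs hle]
          simp [List.filter_append, hk]
        · intro y hy
          simp only [List.mem_filter, decide_eq_true_eq] at hy
          simp only [decide_eq_false_iff_not, not_lt]; omega

theorem pv_sorted_eq_bflat {α : Type} (key : α → Int) (n : Nat) (xs : List α)
    (h : ∀ x ∈ xs, 0 ≤ key x ∧ key x ≤ (n : Int)) :
    PySem.List.sorted xs key true = pvBflat key xs n := by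
  induction xs using List.reverseRecOn with
  | nil => rw [PySem.List.sorted_rev_eq_foldl_insertBy]; simp [pv_bflat_nil]
  | append_singleton xs x ih =>
      rw [PySem.List.sorted_rev_eq_foldl_insertBy, List.foldl_append]
      simp only [List.foldl_cons, List.foldl_nil]
      rw [← PySem.List.sorted_rev_eq_foldl_insertBy,
        ih (fun y hy => h y (by simp [hy]))]
      exact pv_bflat_insert key x (h x (by simp)).1 n xs (h x (by simp)).2

-- weighted keyword fold of port A as a count
theorem pv_foldl_addw (p : String → Bool) (l : List String) (w a : Int) :
    l.foldl (fun s kw => if p kw then s + w else s) a = a + w * (l.countP p : Int) := by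
  induction l generalizing a with
  | nil => simp
  | cons k l ih =>
      simp only [List.foldl_cons, List.countP_cons, ih]
      by_cases h : p k <;> simp [h] <;> push_cast <;> ring

theorem pv_score_eq (low : String) :
    pvScore low =
      ((((0 : Int) + 10 * (["tarif", "fee", "commission", "kosten", "charges", "pricing"].countP
            (fun kw => PySem.Str.isIn kw low) : Int))
        + 5 * (["€", "%", "eur", "minimum", "maximum", "handling"].countP
            (fun kw => PySem.Str.isIn kw low) : Int))
        + 3 * (["brussels", "paris", "amsterdam", "euronext"].countP
            (fun kw => PySem.Str.isIn kw low) : Int))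
        + 2 * (["etf", "equity", "stock", "bond", "aandeel"].countP
            (fun kw => PySem.Str.isIn kw low) : Int) := by
  simp only [pvScore, pvGroups, List.map_cons, List.map_nil, List.sum_cons, List.sum_nil,
    PySem.List.sum_map_ite_one_zero]
  ring

theorem pv_score_bounds (low : String) : 0 ≤ pvScore low ∧ pvScore low ≤ 112 := by
  rw [pv_score_eq]
  have h1 := List.countP_le_length (l := ["tarif", "fee", "commission", "kosten", "charges", "pricing"]) (p := fun kw => PySem.Str.isIn kw low)
  have h2 := List.countP_le_length (l := ["€", "%", "eur", "minimum", "maximum", "handling"]) (p := fun kw => PySem.Str.isIn kw low)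
  have h3 := List.countP_le_length (l := ["brussels", "paris", "amsterdam", "euronext"]) (p := fun kw => PySem.Str.isIn kw low)
  have h4 := List.countP_le_length (l := ["etf", "equity", "stock", "bond", "aandeel"]) (p := fun kw => PySem.Str.isIn kw low)
  simp only [List.length_cons, List.length_nil] at h1 h2 h3 h4
  omega

-- taking a prefix commutes with map (start of the slice is none in both ports)
theorem pv_slice_map {α β : Type} (f : α → β) (xs : List α) (b : Option Int) :
    PySem.List.slice (xs.map f) none b = (PySem.List.slice xs none b).map f := by
  cases b <;> simp [PySem.List.slice, PySem.List.clampIdx]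

-- B's bucket fold computes, for every score s, the lines of that score in order
theorem pv_fold_buckets (g : String → Int) (hb : ∀ l, 0 ≤ g l ∧ g l ≤ 112) (ls : List String) :
    ls.foldl (fun bs line =>
        PySem.List.pySetD bs (g line) (PySem.List.pyGetD bs (g line) [] ++ [line]))
      ((PySem.List.pyRange 0 (112 + 1) 1).map (fun _ => ([] : List String)))
      = (List.range 113).map (fun s : Nat => ls.filter (fun l => g l = (s : Int))) := by
  induction ls using List.reverseRecOn with
  | nil =>
      simp only [List.foldl_nil, List.filter_nil]
      rw [List.map_const', List.map_const', PySem.List.length_pyRange_one, List.length_range]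
      decide
  | append_singleton ls l ih =>
      rw [List.foldl_append, List.foldl_cons, List.foldl_nil, ih]
      have h0 := (hb l).1
      have h112 := (hb l).2
      have hlen : (g l).toNat < ((List.range 113).map
          (fun s : Nat => ls.filter (fun l' => g l' = (s : Int)))).length := by
        simp; omega
      rw [PySem.List.pySetD_of_nonneg _ _ h0,
        PySem.List.pyGetD_eq_getElem _ _ h0 (by simpa using hlen)]
      apply List.ext_getElem
      · simp
      · intro i hi hi'
        simp only [List.getElem_set, List.getElem_map, List.getElem_range,
          List.length_map, List.length_range] at hi' ⊢
        simp only [List.length_set, List.length_map, List.length_range] at hi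
        by_cases hit : (g l).toNat = i
        · have hgi : g l = (i : Int) := by omega
          rw [if_pos hit, List.filter_append]
          simp [hgi]
        · have hgi : ¬ (g l = (i : Int)) := by omega
          rw [if_neg hit, List.filter_append]
          simp [hgi]

-- flattening the reversed bucket table is the descending bucket concatenation
theorem pv_rev_flatten {α : Type} (g : α → Int) (xs : List α) :
    ∀ n : Nat, (((List.range (n + 1)).map
        (fun s : Nat => xs.filter (fun x => g x = (s : Int)))).reverse).flatten
      = pvBflat g xs n := by
  intro n; induction n with
  | zero => simp [pvBflat, List.range_succ]
  | succ n ih =>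
      rw [List.range_succ, List.map_append, List.reverse_append]
      simp only [List.map_cons, List.map_nil, List.reverse_cons, List.reverse_nil,
        List.nil_append, List.cons_append, List.flatten_cons]
      rw [ih]; rfl

-- per-score bucket of A's scored triples, projected to lines
theorem pv_bucket_eq (g : String → Int) (lines : List String) (s : Int) :
    ((((PySem.List.enumerate lines 0).map (fun p => (g p.2, p.1, p.2))).filter
        (fun x => x.1 = s)).map (fun x : Int × Int × String => x.2.2))
      = lines.filter (fun l => g l = s) := by
  rw [List.filter_map, List.map_map]
  have : ((fun (x : Int × Int × String) => decide (x.1 = s)) ∘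
      (fun (p : Int × String) => ((g p.2, p.1, p.2) : Int × Int × String)))
      = ((fun l => decide (g l = s)) ∘ (fun (p : Int × String) => p.2)) := rfl
  rw [this,
    show ((fun x : Int × Int × String => x.2.2) ∘
        (fun (p : Int × String) => ((g p.2, p.1, p.2) : Int × Int × String)))
      = (fun (p : Int × String) => p.2) from rfl,
    ← List.filter_map, PySem.List.map_snd_enumerate]

theorem pv_map_bflat (g : String → Int) (lines : List String) (n : Nat) :
    (pvBflat (fun x => x.1)
        ((PySem.List.enumerate lines 0).map (fun p => (g p.2, p.1, p.2))) n).map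
      (fun x : Int × Int × String => x.2.2)
      = pvBflat g lines n := by
  induction n with
  | zero => simpa [pvBflat] using pv_bucket_eq g lines 0
  | succ n ih =>
      simp only [pvBflat, List.map_append, ih]
      rw [pv_bucket_eq]

-- ===== VERDICT (by name: the statement is the Claim_ definition above) =====
theorem create_focused_text_for_extraction_spec : Claim_equal_create_focused_text_for_extraction := by
  intro text max_lines _
  unfold Spec_create_focused_text_for_extraction
  unfold create_focused_text_for_extraction create_focused_text_for_extraction_alt
  simp only
  set lines := (PySem.Str.split? (PySem.Str.strip text) "\n").getD [] with hlines
  set g : String → Int := fun l => pvScore (PySem.Str.lower l) with hg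
  -- A's scored loop is a map over the enumeration
  rw [PySem.List.foldl_append_singleton_eq_map]
  have hfun : (fun (p : Int × String) =>
      let line := p.2
      let line_lower := PySem.Str.lower line
      let score : Int := 0
      let score := ["tarif", "fee", "commission", "kosten", "charges", "pricing"].foldl
        (fun s kw => if PySem.Str.isIn kw line_lower then s + 10 else s) score
      let score := ["€", "%", "eur", "minimum", "maximum", "handling"].foldl
        (fun s kw => if PySem.Str.isIn kw line_lower then s + 5 else s) score
      let score := ["brussels", "paris", "amsterdam", "euronext"].foldl
        (fun s kw => if PySem.Str.isIn kw line_lower then s + 3 else s) score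
      let score := ["etf", "equity", "stock", "bond", "aandeel"].foldl
        (fun s kw => if PySem.Str.isIn kw line_lower then s + 2 else s) score
      ((score, p.1, line) : Int × Int × String))
      = (fun p : Int × String => ((g p.2, p.1, p.2) : Int × Int × String)) := by
    funext p
    simp only [pv_foldl_addw, hg, pv_score_eq]
  rw [hfun]
  simp only [List.nil_append]
  -- A's sort is the descending bucket concatenation
  rw [pv_sorted_eq_bflat (fun x => x.1) 112
        ((PySem.List.enumerate lines 0).map (fun p => (g p.2, p.1, p.2)))
        (by
          intro x hx
          simp only [List.mem_map] at hx
          obtain ⟨p, _, rfl⟩ := hx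
          simpa using pv_score_bounds (PySem.Str.lower p.2))]
  -- B's buckets
  rw [pv_fold_buckets g (fun l => pv_score_bounds (PySem.Str.lower l)) lines,
    PySem.List.foldl_append_eq_flatMap, List.nil_append, List.flatMap_id',
    pv_rev_flatten g lines 112, ← pv_map_bflat g lines 112, ← pv_slice_map]
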